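-- pv_equiv track=rewrite | github.com/sbrandstaeter/queens | pqueens/utils/qnumpy.py | _create_unique_keys
-- ===== SOURCE A (Python) =====
-- def _create_unique_keys(keys):
--     """Create unique keys.
--
--     Rename duplicate keys by extending the name with _1, _2, ...
--
--     Args:
--         keys (list): List of keys
--
--     Returns:
--         unique_keys (list): List of keys with unique names
--     """
--     unique_keys = list(
--         dict.fromkeys(
--             [
--                 key if keys.count(key) == 1 else key + '_' + str(i + 1)
--                 for key in keys
--                 for i in range(keys.count(key))
--             ]
--         )
--     )
--     return unique_keys
-- ===== SOURCE B (Python) =====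
-- def _create_unique_keys(keys):
--     """Create unique keys: rename duplicates by suffixing _1, _2, ..."""
--     counts = {}
--     for key in keys:
--         counts[key] = counts.get(key, 0) + 1
--     out = []
--     for key, count in counts.items():
--         if count == 1:
--             out.append(key)
--         else:
--             out.extend(key + '_' + str(i + 1) for i in range(count))
--     return list(dict.fromkeys(out))
-- ===== Notes on version B (the rewrite author's own statement) =====
-- stated objective: faster
-- what changed: B builds a frequency dict in one pass and emits each distinct key's block once (iterating the dict's items instead of the original list), replacing A's repeated keys.count scans inside a flattened double comprehension; the final dict.fromkeys dedup is kept for suffix/literal collisions.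
import Mathlib
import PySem

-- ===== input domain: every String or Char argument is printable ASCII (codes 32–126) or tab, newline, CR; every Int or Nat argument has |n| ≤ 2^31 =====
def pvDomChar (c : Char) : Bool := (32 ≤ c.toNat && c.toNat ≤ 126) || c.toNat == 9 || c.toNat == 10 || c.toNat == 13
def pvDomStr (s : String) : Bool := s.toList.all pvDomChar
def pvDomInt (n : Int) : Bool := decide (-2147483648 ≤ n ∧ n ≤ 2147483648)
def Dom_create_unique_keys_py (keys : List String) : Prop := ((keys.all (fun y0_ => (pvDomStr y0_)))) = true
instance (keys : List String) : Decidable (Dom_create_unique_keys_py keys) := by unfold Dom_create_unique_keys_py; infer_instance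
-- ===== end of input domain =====

-- B replaces A's quadratic repeated keys.count scans by a single counting pass plus a
-- pass over the distinct keys (objective: faster, O(n^2) → O(n) dict operations).

-- ===== PORT A =====
-- list(dict.fromkeys([key if keys.count(key)==1 else key+'_'+str(i+1)
--                     for key in keys for i in range(keys.count(key))]))
def create_unique_keys_py (keys : List String) : List String :=
  PySem.List.dedup
    (keys.flatMap (fun key =>
      (PySem.List.pyRange 0 ((keys.count key : Nat) : Int) 1).map (fun i =>
        if keys.count key = 1 then key else key ++ "_" ++ PySem.Int.toStr (i + 1))))

-- ===== PORT B =====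
-- counts[key] = counts.get(key, 0) + 1; then one pass over counts.items(); final dict.fromkeys
def create_unique_keys_py_alt (keys : List String) : List String :=
  let counts : PySem.Dict String Int :=
    keys.foldl (fun d k => d.insert k (d.getD k 0 + 1)) PySem.Dict.empty
  let out : List String :=
    counts.items.foldl (fun acc p =>
      if p.2 = 1 then acc ++ [p.1]
      else acc ++ (PySem.List.pyRange 0 p.2 1).map (fun i => p.1 ++ "_" ++ PySem.Int.toStr (i + 1))) []
  PySem.List.dedup out

-- ===== PRECONDITION & SPEC =====
def Spec_create_unique_keys_py (keys : List String) (out : List String) : Prop := out = create_unique_keys_py_alt keys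
instance (keys : List String) (out : List String) : Decidable (Spec_create_unique_keys_py keys out) := by unfold Spec_create_unique_keys_py; infer_instance

-- ===== CLAIM (what is proved, stated in full; the proofs are below) =====
def Claim_equal_create_unique_keys_py : Prop := ∀ (keys : List String), Dom_create_unique_keys_py keys → Spec_create_unique_keys_py keys (create_unique_keys_py keys)

-- ===== LEMMAS AND PROOFS =====

-- the suffix block produced for one key (shared shape of both ports after rewriting)
def pvBlock (keys : List String) (k : String) : List String :=
  if keys.count k = 1 then [k]
  else (PySem.List.pyRange 0 ((keys.count k : Nat) : Int) 1).map
        (fun i => k ++ "_" ++ PySem.Int.toStr (i + 1))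

-- "dedup relative to a seen-set": the tail of foldl Set.add
def pvDD {α : Type} [BEq α] (seen : List α) : List α → List α
  | [] => []
  | x :: t => if seen.contains x then pvDD seen t else x :: pvDD (x :: seen) t

theorem pvDD_congr {α : Type} [BEq α] [LawfulBEq α] (l : List α) (s₁ s₂ : List α)
    (h : ∀ a, a ∈ s₁ ↔ a ∈ s₂) : pvDD s₁ l = pvDD s₂ l := by
  induction l generalizing s₁ s₂ with
  | nil => rfl
  | cons x t ih =>
    simp only [pvDD, List.contains_iff_mem]
    by_cases hx : x ∈ s₁
    · rw [if_pos hx, if_pos ((h x).mp hx)]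
      exact ih s₁ s₂ h
    · rw [if_neg (by simp [hx]), if_neg (by simp [(h x).not.mp hx])]
      refine congrArg _ (ih _ _ ?_)
      intro a; simp only [List.mem_cons]; exact or_congr Iff.rfl (h a)

theorem pvFoldl_add_eq_append {α : Type} [BEq α] [LawfulBEq α] (l s : List α) :
    l.foldl PySem.Set.add s = s ++ pvDD s l := by
  induction l generalizing s with
  | nil => simp [pvDD]
  | cons x t ih =>
    simp only [List.foldl_cons, pvDD, PySem.Set.add, PySem.Set.contains]
    by_cases hx : x ∈ s
    · rw [if_pos (by simp [hx]),
          if_pos (by simp [hx])]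
      exact ih s
    · rw [if_neg (by simp [hx]),
          if_neg (by simp [hx]), ih (s ++ [x])]
      rw [pvDD_congr t (s ++ [x]) (x :: s) (by intro a; simp [or_comm])]
      simp

theorem pvFoldl_add_of_subset {α : Type} [BEq α] [LawfulBEq α] (l s : List α)
    (h : ∀ b ∈ l, b ∈ s) : l.foldl PySem.Set.add s = s := by
  induction l with
  | nil => rfl
  | cons x t ih =>
    simp only [List.foldl_cons, PySem.Set.add, PySem.Set.contains]
    rw [if_pos (by simp [h x (by simp)])]
    exact ih (fun b hb => h b (by simp [hb]))

theorem pvMem_foldl_add {α : Type} [BEq α] [LawfulBEq α] (l s : List α) (b : α) :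
    b ∈ l.foldl PySem.Set.add s ↔ b ∈ s ∨ b ∈ l := by
  induction l generalizing s with
  | nil => simp
  | cons x t ih =>
    simp only [List.foldl_cons, ih, PySem.Set.mem_add, List.mem_cons]
    tauto

-- deduplicating the flattened blocks ignores blocks of keys already processed
theorem pvFoldl_add_flatMap {α β : Type} [BEq α] [LawfulBEq α] [BEq β] [LawfulBEq β]
    (f : α → List β) (l : List α) (seen : List α) (s : List β)
    (h : ∀ a ∈ seen, ∀ b ∈ f a, b ∈ s) :
    (l.flatMap f).foldl PySem.Set.add s = ((pvDD seen l).flatMap f).foldl PySem.Set.add s := by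
  induction l generalizing seen s with
  | nil => rfl
  | cons x t ih =>
    simp only [List.flatMap_cons, List.foldl_append, pvDD]
    by_cases hx : x ∈ seen
    · rw [if_pos (by simp [hx])]
      rw [pvFoldl_add_of_subset (f x) s (h x hx)]
      exact ih seen s h
    · rw [if_neg (by simp [hx])]
      simp only [List.flatMap_cons, List.foldl_append]
      refine ih (x :: seen) ((f x).foldl PySem.Set.add s) ?_
      intro a ha b hb
      rcases List.mem_cons.mp ha with rfl | ha'
      · exact (pvMem_foldl_add (f a) s b).mpr (Or.inr hb)
      · exact (pvMem_foldl_add (f x) s b).mpr (Or.inl (h a ha' b hb))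

theorem pvDedup_flatMap_dedup {α β : Type} [BEq α] [LawfulBEq α] [BEq β] [LawfulBEq β]
    (f : α → List β) (l : List α) :
    PySem.List.dedup (l.flatMap f) = PySem.List.dedup ((PySem.Set.ofList l).flatMap f) := by
  have hofl : PySem.Set.ofList l = pvDD ([] : List α) l := by
    rw [PySem.Set.ofList_eq_foldl, pvFoldl_add_eq_append]; simp
  rw [PySem.List.dedup_eq_ofList, PySem.List.dedup_eq_ofList,
      PySem.Set.ofList_eq_foldl, PySem.Set.ofList_eq_foldl, hofl]
  exact pvFoldl_add_flatMap f l [] [] (by simp)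

-- A's per-key comprehension equals pvBlock
theorem pvBlockA_eq (keys : List String) (k : String) :
    (PySem.List.pyRange 0 ((keys.count k : Nat) : Int) 1).map
      (fun i => if keys.count k = 1 then k else k ++ "_" ++ PySem.Int.toStr (i + 1))
    = pvBlock keys k := by
  unfold pvBlock
  by_cases h : keys.count k = 1
  · rw [h]; simp
  · simp [h]

-- B's loop body over counts.items() flattens to pvBlock over the distinct keys
theorem pvAlt_eq (keys : List String) :
    create_unique_keys_py_alt keys
      = PySem.List.dedup ((PySem.Set.ofList keys).flatMap (pvBlock keys)) := by
  show PySem.List.dedup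
      (((keys.foldl (fun d k => d.insert k (d.getD k 0 + 1)) PySem.Dict.empty).items).foldl
        (fun acc p =>
          if p.2 = 1 then acc ++ [p.1]
          else acc ++ (PySem.List.pyRange 0 p.2 1).map (fun i => p.1 ++ "_" ++ PySem.Int.toStr (i + 1))) [])
    = _
  rw [PySem.Dict.foldl_insert_getD_add_one_eq_counter, PySem.Dict.items_counter,
      List.foldl_map]
  rw [PySem.List.foldl_congr_mem _ _ (fun acc k => acc ++ pvBlock keys k) _ ?_]
  · rw [PySem.List.foldl_append_eq_flatMap]; simp
  · intro acc k hk
    unfold pvBlock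
    by_cases h : keys.count k = 1
    · simp [h]
    · have : ((keys.count k : Nat) : Int) ≠ 1 := by exact_mod_cast h
      simp [h, this]

-- ===== VERDICT (by name: the statement is the Claim_ definition above) =====
theorem create_unique_keys_py_spec : Claim_equal_create_unique_keys_py := by
  intro keys _
  show create_unique_keys_py keys = create_unique_keys_py_alt keys
  unfold create_unique_keys_py
  rw [pvAlt_eq]
  calc PySem.List.dedup (keys.flatMap (fun key =>
          (PySem.List.pyRange 0 ((keys.count key : Nat) : Int) 1).map (fun i =>
            if keys.count key = 1 then key else key ++ "_" ++ PySem.Int.toStr (i + 1))))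
      = PySem.List.dedup (keys.flatMap (pvBlock keys)) := by
        rw [List.flatMap_congr (fun k _ => pvBlockA_eq keys k)]
    _ = PySem.List.dedup ((PySem.Set.ofList keys).flatMap (pvBlock keys)) :=
        pvDedup_flatMap_dedup (pvBlock keys) keys
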